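-- pv_equiv track=rewrite | github.com/finwarman/advent-of-code-2020 | 20/01.py | get_borders
-- ===== SOURCE A (Python) =====
-- def get_borders(tile):
--     width, height = len(tile[0]), len(tile)
--
--     borders = []
--     borders.append(tile[0])
--     borders.append(tile[-1])
--     l, r = "", ""
--     for i in range(height):
--         l += tile[i][0]
--         r += tile[i][-1]
--     borders.append(l)
--     borders.append(r)
--
--     # TOP, BOTTOM, LEFT, RIGHT
--     return borders
-- ===== SOURCE B (Python) =====
-- def get_borders(tile):
--     def go(lo, hi):
--         # (left, right) border segments of the row block tile[lo:hi], hi > lo,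
--         # by divide and conquer on the row range.
--         if hi - lo == 1:
--             row = tile[lo]
--             return row[0], row[-1]
--         mid = (lo + hi) // 2
--         l1, r1 = go(lo, mid)
--         l2, r2 = go(mid, hi)
--         return l1 + l2, r1 + r2
--
--     left, right = go(0, len(tile))
--     return [tile[0], tile[-1], left, right]
-- ===== Notes on version B (the rewrite author's own statement) =====
-- stated objective: alternative
-- what changed: Replaces A's linear index loop with two growing string accumulators by a divide-and-conquer recursion on the row range that computes the left/right border segments of each half and concatenates them.
import Mathlib
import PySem

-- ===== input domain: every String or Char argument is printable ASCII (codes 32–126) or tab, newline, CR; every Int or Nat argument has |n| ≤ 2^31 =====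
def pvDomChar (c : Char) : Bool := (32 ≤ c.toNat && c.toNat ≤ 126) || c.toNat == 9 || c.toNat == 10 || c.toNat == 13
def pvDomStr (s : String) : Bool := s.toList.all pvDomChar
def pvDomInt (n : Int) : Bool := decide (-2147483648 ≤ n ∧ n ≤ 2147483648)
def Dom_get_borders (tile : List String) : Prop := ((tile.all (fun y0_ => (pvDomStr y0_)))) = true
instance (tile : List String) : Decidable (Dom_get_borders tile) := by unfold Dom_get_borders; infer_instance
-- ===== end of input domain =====

-- B replaces A's index loop + accumulators by divide-and-conquer on the row range; alternative decomposition, same result.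


-- ===== PORT A =====
-- Literal port of A: top/bottom by indexing, then one loop over row indices that
-- extends two accumulated border strings (kept as List Char; joined at the end).
def get_borders (tile : List String) : List String :=
  let height : Int := tile.length
  let top := PySem.List.pyGetD tile 0 ""
  let bot := PySem.List.pyGetD tile (-1) ""
  let lr : List Char × List Char :=
    (PySem.List.pyRange 0 height 1).foldl
      (fun lr i =>
        let row := PySem.List.pyGetD tile i ""
        (lr.1 ++ [(PySem.Str.pyGet? row 0).getD ' '],
         lr.2 ++ [(PySem.Str.pyGet? row (-1)).getD ' '])
      )
      ([], [])
  [top, bot, String.ofList lr.1, String.ofList lr.2]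

-- ===== PORT B =====
-- Port of B's helper go: divide-and-conquer on the row range [lo, hi).
-- The 'hi ≤ lo' guard only makes the recursion total: Python's go is never
-- called with hi ≤ lo (B calls it with 0 < len(tile); Pre_ excludes []).
def goB (tile : List String) (lo hi : Nat) : List Char × List Char :=
  if hi = lo + 1 then
    let row := PySem.List.pyGetD tile (lo : Int) ""
    ([(PySem.Str.pyGet? row 0).getD ' '], [(PySem.Str.pyGet? row (-1)).getD ' '])
  else if hi ≤ lo then ([], [])
  else
    let mid := (lo + hi) / 2
    let a := goB tile lo mid
    let b := goB tile mid hi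
    (a.1 ++ b.1, a.2 ++ b.2)
termination_by hi - lo
decreasing_by all_goals omega

def get_borders_alt (tile : List String) : List String :=
  let lr := goB tile 0 tile.length
  [PySem.List.pyGetD tile 0 "", PySem.List.pyGetD tile (-1) "",
   String.ofList lr.1, String.ofList lr.2]

-- ===== PRECONDITION & SPEC =====
-- Pre_ excludes exactly the inputs on which A raises IndexError: the empty tile
-- (tile[0]) and tiles containing an empty row (tile[i][0]).
def Pre_get_borders (tile : List String) : Prop := tile ≠ [] ∧ ∀ s ∈ tile, s ≠ ""
instance (tile : List String) : Decidable (Pre_get_borders tile) := by unfold Pre_get_borders; infer_instance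
def pvWitness_get_borders : List String := ["ab", "cd"]
def Spec_get_borders (tile : List String) (out : List String) : Prop := out = get_borders_alt tile
instance (tile : List String) (out : List String) : Decidable (Spec_get_borders tile out) := by unfold Spec_get_borders; infer_instance

-- ===== CLAIM (what is proved, stated in full; the proofs are below) =====
def Claim_equal_get_borders : Prop := ∀ (tile : List String), Dom_get_borders tile → Pre_get_borders tile → Spec_get_borders tile (get_borders tile)

-- ===== LEMMAS AND PROOFS =====

-- A's accumulator loop over the rows equals two independent maps.
theorem pv_foldl_pair (tile : List String) (l r : List Char) :
    tile.foldl
      (fun (lr : List Char × List Char) row =>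
        (lr.1 ++ [(PySem.Str.pyGet? row 0).getD ' '],
         lr.2 ++ [(PySem.Str.pyGet? row (-1)).getD ' ']))
      (l, r)
    = (l ++ tile.map (fun row => (PySem.Str.pyGet? row 0).getD ' '),
       r ++ tile.map (fun row => (PySem.Str.pyGet? row (-1)).getD ' ')) := by
  induction tile generalizing l r with
  | nil => simp
  | cons x xs ih => rw [List.foldl_cons, ih]; simp

-- B's divide-and-conquer over [lo, hi) computes the two maps over tile[lo:hi].
theorem pv_goB_eq (tile : List String) :
    ∀ n lo hi, hi - lo = n → lo < hi → hi ≤ tile.length →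
    goB tile lo hi
    = (((tile.drop lo).take (hi - lo)).map (fun row => (PySem.Str.pyGet? row 0).getD ' '),
       ((tile.drop lo).take (hi - lo)).map (fun row => (PySem.Str.pyGet? row (-1)).getD ' ')) := by
  intro n
  induction n using Nat.strong_induction_on with
  | _ n ih =>
    intro lo hi hn hlt hle
    have hlolen : lo < tile.length := Nat.lt_of_lt_of_le hlt hle
    rw [goB]
    by_cases hbase : hi = lo + 1
    · subst hbase
      rw [if_pos rfl]
      have ht : lo + 1 - lo = 1 := by omega
      rw [ht]
      have key : ∀ (f : String → Char),
          [f (PySem.List.pyGetD tile (lo : Int) "")] = (((tile.map f).drop lo).take 1) := by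
        intro f
        have hl2 : lo < (tile.map f).length := by simpa using hlolen
        rw [List.drop_eq_getElem_cons hl2]
        simp [PySem.List.pyGetD_natCast, List.getElem?_eq_getElem hlolen]
      simp only [List.map_take, List.map_drop]
      exact Prod.ext_iff.mpr
        ⟨key (fun row => (PySem.Str.pyGet? row 0).getD ' '),
         key (fun row => (PySem.Str.pyGet? row (-1)).getD ' ')⟩
    · have h2 : lo + 2 ≤ hi := by omega
      simp only [if_neg hbase, if_neg (by omega : ¬ hi ≤ lo)]
      have hm1 : lo < (lo + hi) / 2 := by omega
      have hm2 : (lo + hi) / 2 < hi := by omega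
      rw [ih ((lo + hi) / 2 - lo) (by omega) lo ((lo + hi) / 2) rfl hm1 (by omega),
          ih (hi - (lo + hi) / 2) (by omega) ((lo + hi) / 2) hi rfl hm2 hle]
      have hsplit :
          (tile.drop lo).take (hi - lo)
          = (tile.drop lo).take ((lo + hi) / 2 - lo)
            ++ (tile.drop ((lo + hi) / 2)).take (hi - (lo + hi) / 2) := by
        have h1 : hi - lo = ((lo + hi) / 2 - lo) + (hi - (lo + hi) / 2) := by omega
        have h2 : ((lo + hi) / 2 - lo) + lo = (lo + hi) / 2 := by omega
        have h3 : lo + ((lo + hi) / 2 - lo) = (lo + hi) / 2 := by omega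
        rw [h1, List.take_add, List.drop_drop]
        rw [h3]
      simp [hsplit]

-- ===== VERDICT (by name: the statement is the Claim_ definition above) =====
theorem get_borders_spec : Claim_equal_get_borders := by
  intro tile _ hpre
  obtain ⟨hne, _⟩ := hpre
  have hpos : 0 < tile.length := List.length_pos_iff.mpr hne
  simp only [Spec_get_borders, get_borders, get_borders_alt]
  rw [pv_goB_eq tile tile.length 0 tile.length rfl hpos le_rfl]
  rw [PySem.List.foldl_pyRange_zero_pyGetD' tile ""
      (fun (lr : List Char × List Char) row =>
        (lr.1 ++ [(PySem.Str.pyGet? row 0).getD ' '],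
         lr.2 ++ [(PySem.Str.pyGet? row (-1)).getD ' '])) ([], [])]
  rw [pv_foldl_pair]
  simp
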